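-- pv_equiv track=rewrite | github.com/hrwhisper/algorithm_course | 1_Divide_and_Conquer/codes/6.py | brute_inversions
-- ===== SOURCE A (Python) =====
-- def brute_inversions(a):
--     n = len(a)
--     _cnt = 0
--     for i in range(n):
--         for j in range(i + 1, n):
--             if a[i] > 3 * a[j]:
--                 _cnt += 1
--     return _cnt
-- ===== SOURCE B (Python) =====
-- def brute_inversions(a):
--     # Merge-sort counting: count pairs i<j with a[i] > 3*a[j] in O(n log n).
--     def sort_count(xs):
--         if len(xs) <= 1:
--             return xs, 0
--         mid = len(xs) // 2
--         left, cl = sort_count(xs[:mid])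
--         right, cr = sort_count(xs[mid:])
--         cnt = cl + cr
--         # two-pointer cross count: both halves sorted, threshold 3*y is monotone
--         i = 0
--         for y in right:
--             while i < len(left) and left[i] <= 3 * y:
--                 i += 1
--             cnt += len(left) - i
--         # merge
--         merged = []
--         i = j = 0
--         while i < len(left) and j < len(right):
--             if left[i] <= right[j]:
--                 merged.append(left[i]); i += 1
--             else:
--                 merged.append(right[j]); j += 1
--         merged.extend(left[i:])
--         merged.extend(right[j:])
--         return merged, cnt
--     return sort_count(a)[1]
-- ===== Notes on version B (the rewrite author's own statement) =====
-- stated objective: faster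
-- what changed: Replaced the O(n^2) double loop by merge-sort counting: recursively sort each half while counting within-half pairs, count cross pairs a[i] > 3*a[j] with a monotone two-pointer sweep over the sorted halves, then merge.
import Mathlib
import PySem

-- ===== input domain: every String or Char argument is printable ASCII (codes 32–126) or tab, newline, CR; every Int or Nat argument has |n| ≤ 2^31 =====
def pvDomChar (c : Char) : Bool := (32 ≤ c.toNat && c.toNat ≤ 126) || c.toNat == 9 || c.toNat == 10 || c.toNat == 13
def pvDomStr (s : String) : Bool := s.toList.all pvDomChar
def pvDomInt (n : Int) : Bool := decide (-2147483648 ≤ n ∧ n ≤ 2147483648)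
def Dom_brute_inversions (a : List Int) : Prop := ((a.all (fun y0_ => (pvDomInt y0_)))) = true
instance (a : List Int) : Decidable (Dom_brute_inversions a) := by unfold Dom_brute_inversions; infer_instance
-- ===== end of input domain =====

-- B replaces A's quadratic double loop by merge-sort counting of pairs a[i] > 3*a[j] (asymptotically faster).


-- ===== PORT A =====
def brute_inversions (a : List Int) : Int :=
  let n : Int := a.length
  (PySem.List.pyRange 0 n 1).foldl (fun cnt i =>
    (PySem.List.pyRange (i + 1) n 1).foldl (fun cnt j =>
      if PySem.List.pyGetD a i 0 > 3 * PySem.List.pyGetD a j 0 then cnt + 1 else cnt) cnt) 0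

-- ===== PORT B =====
-- the 'while i < len(left) and left[i] <= 3*y: i += 1' pointer advance, ported as the remaining suffix of left
def pvDrop3 (rem : List Int) (y : Int) : List Int :=
  match rem with
  | [] => []
  | x :: t => if x ≤ 3 * y then pvDrop3 t y else x :: t

-- the cross-count loop 'for y in right: …; cnt += len(left) - i'
def pvCross (left right : List Int) : Int :=
  (right.foldl (fun (s : List Int × Int) y =>
    let rem := pvDrop3 s.1 y
    (rem, s.2 + (rem.length : Int))) (left, 0)).2

-- the merge loop (trailing extends included)
def pvMerge : List Int → List Int → List Int
  | [], r => r
  | l, [] => l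
  | x :: l, y :: r => if x ≤ y then x :: pvMerge l (y :: r) else y :: pvMerge (x :: l) r

def pvSortCount (xs : List Int) : List Int × Int :=
  if h : xs.length ≤ 1 then (xs, 0)
  else
    let mid := xs.length / 2
    let lres := pvSortCount (xs.take mid)
    let rres := pvSortCount (xs.drop mid)
    let cnt := lres.2 + rres.2 + pvCross lres.1 rres.1
    (pvMerge lres.1 rres.1, cnt)
termination_by xs.length
decreasing_by
  · simp only [List.length_take]; omega
  · simp only [List.length_drop]; omega

def brute_inversions_alt (a : List Int) : Int := (pvSortCount a).2

-- ===== PRECONDITION & SPEC =====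
def Spec_brute_inversions (a : List Int) (out : Int) : Prop := out = brute_inversions_alt a
instance (a : List Int) (out : Int) : Decidable (Spec_brute_inversions a out) := by unfold Spec_brute_inversions; infer_instance

-- ===== CLAIM (what is proved, stated in full; the proofs are below) =====
def Claim_equal_brute_inversions : Prop := ∀ (a : List Int), Dom_brute_inversions a → Spec_brute_inversions a (brute_inversions a)

-- ===== LEMMAS AND PROOFS =====

def pvC : List Int → Int
  | [] => 0
  | x :: xs => (xs.countP (fun y => decide (3 * y < x)) : Int) + pvC xs

def pvCross' (l r : List Int) : Int :=
  (r.map (fun y => (l.countP (fun x => decide (3 * y < x)) : Int))).sum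

lemma pvC_append (l r : List Int) : pvC (l ++ r) = pvC l + pvC r + pvCross' l r := by
  induction l with
  | nil => simp [pvC, pvCross', List.countP_nil]
  | cons x l ih =>
      simp only [List.cons_append, pvC, List.countP_append, ih, pvCross']
      push_cast
      rw [show ∀ s : List Int, (s.map (fun y => ((List.countP (fun x_1 => decide (3*y < x_1)) (x :: l) : Nat) : Int))).sum
            = (s.map (fun y => (if 3*y < x then (1:Int) else 0) + (l.countP (fun x_1 => decide (3*y < x_1)) : Int))).sum
          from fun s => by
            congr 1; apply List.map_congr_left; intro y _
            by_cases h : 3*y < x <;> simp [List.countP_cons, h] <;> push_cast <;> ring]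
      rw [PySem.List.sum_map_add_int]
      have hh := PySem.List.sum_map_ite_one_zero (fun y => decide (3*(y:Int) < x)) r
      simp only [decide_eq_true_eq] at hh
      rw [hh]
      ring

lemma pvDrop3_eq_dropWhile (rem : List Int) (y : Int) :
    pvDrop3 rem y = rem.dropWhile (fun x => decide (x ≤ 3*y)) := by
  induction rem with
  | nil => rfl
  | cons x t ih => by_cases h : x ≤ 3*y <;> simp [pvDrop3, List.dropWhile_cons, h, ih]

lemma length_pvDrop3 (rem : List Int) (y : Int) (h : rem.Pairwise (· ≤ ·)) :
    ((pvDrop3 rem y).length : Int) = (rem.countP (fun x => decide (3*y < x)) : Nat) := by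
  induction rem with
  | nil => rfl
  | cons x t ih =>
      rcases List.pairwise_cons.mp h with ⟨hx, ht⟩
      by_cases hle : x ≤ 3*y
      · simp [pvDrop3, hle, List.countP_cons, not_lt.mpr hle, ih ht]
      · rw [not_le] at hle
        have : t.countP (fun z => decide (3*y < z)) = t.length :=
          List.countP_eq_length.mpr (fun z hz => by simp; exact lt_of_lt_of_le hle (hx z hz))
        simp [pvDrop3, not_le.mpr hle, List.countP_cons, hle, this]

lemma countP_pvDrop3 (rem : List Int) (y y' : Int) (hy : y ≤ y') :
    (pvDrop3 rem y).countP (fun x => decide (3*y' < x)) = rem.countP (fun x => decide (3*y' < x)) := by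
  rw [pvDrop3_eq_dropWhile]
  conv_rhs => rw [← List.takeWhile_append_dropWhile (p := fun x => decide (x ≤ 3*y)) (l := rem)]
  rw [List.countP_append]
  have : (rem.takeWhile (fun x => decide (x ≤ 3*y))).countP (fun x => decide (3*y' < x)) = 0 := by
    apply List.countP_eq_zero.mpr
    intro z hz
    have := List.mem_takeWhile_imp hz
    simp at this ⊢
    omega
  omega

lemma pairwise_pvDrop3 (rem : List Int) (y : Int) (h : rem.Pairwise (· ≤ ·)) :
    (pvDrop3 rem y).Pairwise (· ≤ ·) := by
  rw [pvDrop3_eq_dropWhile]; exact h.sublist (List.dropWhile_sublist _)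

lemma cross_go (right : List Int) : ∀ (rem : List Int) (c : Int),
    rem.Pairwise (· ≤ ·) → right.Pairwise (· ≤ ·) →
    (right.foldl (fun (s : List Int × Int) y =>
      let rem := pvDrop3 s.1 y
      (rem, s.2 + (rem.length : Int))) (rem, c)).2 = c + pvCross' rem right := by
  induction right with
  | nil => intro rem c _ _; simp [pvCross']
  | cons y rt ih =>
      intro rem c hrem hr
      rcases List.pairwise_cons.mp hr with ⟨hy, hrt⟩
      simp only [List.foldl_cons]
      rw [ih _ _ (pairwise_pvDrop3 _ _ hrem) hrt]
      have hlen := length_pvDrop3 rem y hrem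
      have hmap : pvCross' (pvDrop3 rem y) rt = pvCross' rem rt := by
        unfold pvCross'
        congr 1
        apply List.map_congr_left
        intro y' hy'
        rw [countP_pvDrop3 rem y y' (hy y' hy')]
      simp only [pvCross', List.map_cons, List.sum_cons] at *
      rw [hmap] at *
      simp [pvCross'] at *
      push_cast at *
      rw [hlen]
      push_cast
      ring

lemma pvCross_eq (l r : List Int) (hl : l.Pairwise (· ≤ ·)) (hr : r.Pairwise (· ≤ ·)) :
    pvCross l r = pvCross' l r := by
  unfold pvCross
  rw [cross_go r l 0 hl hr]
  ring

lemma pvCross'_perm {l l' r r' : List Int} (h1 : l.Perm l') (h2 : r.Perm r') :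
    pvCross' l r = pvCross' l' r' := by
  unfold pvCross'
  have : ∀ s : List Int, (s.map (fun y => ((l.countP (fun x => decide (3*y < x)) : Nat) : Int)))
      = s.map (fun y => ((l'.countP (fun x => decide (3*y < x)) : Nat) : Int)) := by
    intro s; apply List.map_congr_left; intro y _; rw [h1.countP_eq]
  rw [this]
  exact (h2.map _).sum_eq

lemma pvMerge_eq_merge (l r : List Int) : pvMerge l r = l.merge r (fun a b => a ≤ b) := by
  fun_induction pvMerge l r with
  | case1 r => simp [List.merge]
  | case2 l h => cases l <;> simp_all [List.merge]
  | case3 x l y r hle ih => simp [List.merge, hle, ih]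
  | case4 x l y r hle ih => simp [List.merge, hle, ih]

lemma pvSortCount_spec (xs : List Int) :
    (pvSortCount xs).1.Perm xs ∧ (pvSortCount xs).1.Pairwise (· ≤ ·) ∧ (pvSortCount xs).2 = pvC xs := by
  fun_induction pvSortCount xs with
  | case1 xs h =>
      refine ⟨List.Perm.refl _, ?_, ?_⟩
      · match xs with
        | [] => simp
        | [x] => simp
        | x :: y :: t => simp at h
      · match xs with
        | [] => rfl
        | [x] => simp [pvC]
        | x :: y :: t => simp at h
  | case2 xs h mid L R cval ihl ihr =>
      obtain ⟨pl, sl, cl⟩ := ihl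
      obtain ⟨pr, sr, cr⟩ := ihr
      have hxs : List.take mid xs ++ List.drop mid xs = xs := List.take_append_drop _ _
      refine ⟨?_, ?_, ?_⟩
      · show (pvMerge (pvSortCount (xs.take mid)).1 (pvSortCount (xs.drop mid)).1).Perm xs
        rw [pvMerge_eq_merge]
        have h1 : (((pvSortCount (xs.take mid)).1).merge ((pvSortCount (xs.drop mid)).1) (fun a b => a ≤ b)).Perm
            ((pvSortCount (xs.take mid)).1 ++ (pvSortCount (xs.drop mid)).1) :=
          List.merge_perm_append _
        have := h1.trans (pl.append pr)
        rwa [hxs] at this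
      · show (pvMerge (pvSortCount (xs.take mid)).1 (pvSortCount (xs.drop mid)).1).Pairwise (· ≤ ·)
        rw [pvMerge_eq_merge]
        exact List.Pairwise.merge sl sr
      · show (pvSortCount (xs.take mid)).2 + (pvSortCount (xs.drop mid)).2
            + pvCross (pvSortCount (xs.take mid)).1 (pvSortCount (xs.drop mid)).1 = pvC xs
        rw [pvCross_eq _ _ sl sr, pvCross'_perm pl pr, cl, cr, ← pvC_append, hxs]

lemma pvS_eq_pvC (a : List Int) :
    ((List.range a.length).map (fun k => (((a.drop (k+1)).countP (fun y => decide (3*y < a.getD k 0)) : Nat) : Int))).sum = pvC a := by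
  induction a with
  | nil => simp [pvC]
  | cons x xs ih =>
      rw [List.length_cons, List.range_succ_eq_map]
      simp only [List.map_cons, List.map_map, List.sum_cons]
      have ht : (List.range xs.length).map
            ((fun k => ((((x::xs).drop (k+1)).countP (fun y => decide (3*y < (x::xs).getD k 0)) : Nat) : Int)) ∘ Nat.succ)
          = (List.range xs.length).map (fun k => (((xs.drop (k+1)).countP (fun y => decide (3*y < xs.getD k 0)) : Nat) : Int)) := by
        apply List.map_congr_left; intro k _
        simp [Function.comp, List.drop_succ_cons, List.getD_cons_succ]
      rw [ht, ih]
      simp [pvC]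

lemma brute_eq_pvC (a : List Int) : brute_inversions a = pvC a := by
  unfold brute_inversions
  rw [PySem.List.foldl_congr_mem _ _
      (fun cnt i => cnt + (((a.drop (i+1).toNat).countP (fun y => decide (3*y < PySem.List.pyGetD a i 0)) : Nat) : Int)) _
      (by
        intro acc i hi
        have h0 : (0:Int) ≤ i + 1 := by
          have := (PySem.List.mem_pyRange_one.mp hi).1; omega
        rw [PySem.List.foldl_pyRange_pyGetD' a 0
            (fun c y => if PySem.List.pyGetD a i 0 > 3*y then c + 1 else c) acc h0,
            PySem.List.foldl_ite_add_one (fun y => PySem.List.pyGetD a i 0 > 3*y)])]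
  rw [PySem.List.foldl_add]
  rw [PySem.List.pyRange_one]
  simp only [List.map_map, zero_add, Int.sub_zero, Int.toNat_natCast]
  rw [show (List.range a.length).map
        ((fun i => (((a.drop (i+1).toNat).countP (fun y => decide (3*y < PySem.List.pyGetD a i 0)) : Nat) : Int)) ∘ (fun k : Nat => ((k : Int))))
      = (List.range a.length).map (fun k => (((a.drop (k+1)).countP (fun y => decide (3*y < a.getD k 0)) : Nat) : Int)) from by
    apply List.map_congr_left; intro k _
    have h1 : ((k : Int) + 1).toNat = k + 1 := by omega
    simp [Function.comp, PySem.List.pyGetD_natCast, h1]]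
  rw [pvS_eq_pvC]


-- ===== VERDICT (by name: the statement is the Claim_ definition above) =====
theorem brute_inversions_spec : Claim_equal_brute_inversions := by
  intro a _
  unfold Spec_brute_inversions
  rw [brute_eq_pvC, brute_inversions_alt, (pvSortCount_spec a).2.2]
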